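-- pv_equiv track=rewrite | github.com/Gizzatovamir/smoed | lab4.py | build_corr_table
-- ===== SOURCE A (Python) =====
-- def check(value_1, value_2, border_1, border_2):
--     is_1_in_interval  = value_1 >= border_1[0] and value_1 <= border_1[1]
--     is_2_in_interval = value_2 >= border_2[0] and value_2 <= border_2[1]
--     return is_1_in_interval and is_2_in_interval
--
-- def build_corr_table(sample_2D, borders_1, borders_2):
--     table = []
--     for i in range(len(borders_1)):
--         table.append([])
--         for j in range(len(borders_2)):
--             tmp = map(lambda x: check(x[0], x[1], borders_1[i], borders_2[j]), sample_2D)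
--             table[i].append(sum(tmp))
--     return table
-- ===== SOURCE B (Python) =====
-- def build_corr_table(sample_2D, borders_1, borders_2):
--     # Sample-major single pass: precompute matching column indices per sample,
--     # then bump only the matching cells of a mutable grid.
--     grid = [[0] * len(borders_2) for _ in borders_1]
--     for x, y in sample_2D:
--         js = [j for j, b in enumerate(borders_2) if b[0] <= y <= b[1]]
--         for i, b in enumerate(borders_1):
--             if b[0] <= x <= b[1]:
--                 row = grid[i]
--                 for j in js:
--                     row[j] += 1
--     return grid
-- ===== Notes on version B (the rewrite author's own statement) =====
-- stated objective: faster
-- what changed: Cell-major triple scan (for each cell, re-scan all samples) replaced by a sample-major single pass that precomputes each sample's matching column indices and increments only the matching cells of a mutable grid.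
import Mathlib
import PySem

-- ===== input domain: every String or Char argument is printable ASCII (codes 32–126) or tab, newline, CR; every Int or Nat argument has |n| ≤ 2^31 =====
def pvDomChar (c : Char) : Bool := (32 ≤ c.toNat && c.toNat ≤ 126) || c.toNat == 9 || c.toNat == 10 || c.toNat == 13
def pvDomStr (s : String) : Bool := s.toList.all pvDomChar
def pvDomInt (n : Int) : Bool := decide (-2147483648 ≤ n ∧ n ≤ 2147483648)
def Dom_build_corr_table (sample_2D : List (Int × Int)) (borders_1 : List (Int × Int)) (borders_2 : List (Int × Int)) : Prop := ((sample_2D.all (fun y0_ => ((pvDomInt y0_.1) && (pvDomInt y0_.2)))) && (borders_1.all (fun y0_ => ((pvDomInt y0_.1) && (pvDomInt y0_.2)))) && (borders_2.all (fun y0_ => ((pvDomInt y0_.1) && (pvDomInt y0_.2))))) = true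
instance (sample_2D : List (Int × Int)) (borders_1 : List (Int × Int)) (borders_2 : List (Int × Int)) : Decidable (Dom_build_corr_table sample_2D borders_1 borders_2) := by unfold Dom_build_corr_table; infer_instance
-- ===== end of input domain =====

-- B replaces A's cell-major triple scan with a single sample-major pass that increments only matching grid cells (objective: faster).
-- ===== PORT A =====
def pvCheck (value_1 value_2 : Int) (border_1 border_2 : Int × Int) : Bool :=
  let is_1_in_interval := decide (value_1 ≥ border_1.1) && decide (value_1 ≤ border_1.2)
  let is_2_in_interval := decide (value_2 ≥ border_2.1) && decide (value_2 ≤ border_2.2)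
  is_1_in_interval && is_2_in_interval

def build_corr_table (sample_2D : List (Int × Int)) (borders_1 : List (Int × Int)) (borders_2 : List (Int × Int)) : List (List Int) :=
  (PySem.List.pyRange 0 borders_1.length 1).foldl (fun table i =>
    let table := table ++ [[]]
    (PySem.List.pyRange 0 borders_2.length 1).foldl (fun table j =>
      let tmp := sample_2D.map (fun x =>
        pvCheck x.1 x.2 (PySem.List.pyGetD borders_1 i ((0:Int),(0:Int))) (PySem.List.pyGetD borders_2 j ((0:Int),(0:Int))))
      PySem.List.pySetD table i
        ((PySem.List.pyGetD table i []) ++ [tmp.foldl (fun acc b => acc + (if b then (1:Int) else 0)) 0])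
    ) table) []

-- ===== PORT B =====
def pvIn (b : Int × Int) (v : Int) : Bool := decide (b.1 ≤ v) && decide (v ≤ b.2)

def build_corr_table_alt (sample_2D : List (Int × Int)) (borders_1 : List (Int × Int)) (borders_2 : List (Int × Int)) : List (List Int) :=
  let grid0 := borders_1.map (fun _ => borders_2.map (fun _ => (0:Int)))
  sample_2D.foldl (fun grid xy =>
    let js := ((PySem.List.enumerate borders_2).filter (fun p => pvIn p.2 xy.2)).map (·.1)
    (PySem.List.enumerate borders_1).foldl (fun g p =>
      if pvIn p.2 xy.1 then
        PySem.List.pySetD g p.1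
          (js.foldl (fun row j => PySem.List.pySetD row j (PySem.List.pyGetD row j 0 + 1))
            (PySem.List.pyGetD g p.1 []))
      else g) grid) grid0

-- ===== PRECONDITION & SPEC =====
def Spec_build_corr_table (sample_2D : List (Int × Int)) (borders_1 : List (Int × Int)) (borders_2 : List (Int × Int)) (out : List (List Int)) : Prop := out = build_corr_table_alt sample_2D borders_1 borders_2
instance (sample_2D : List (Int × Int)) (borders_1 : List (Int × Int)) (borders_2 : List (Int × Int)) (out : List (List Int)) : Decidable (Spec_build_corr_table sample_2D borders_1 borders_2 out) := by unfold Spec_build_corr_table; infer_instance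

-- ===== CLAIM (what is proved, stated in full; the proofs are below) =====
def Claim_equal_build_corr_table : Prop := ∀ (sample_2D : List (Int × Int)) (borders_1 : List (Int × Int)) (borders_2 : List (Int × Int)), Dom_build_corr_table sample_2D borders_1 borders_2 → Spec_build_corr_table sample_2D borders_1 borders_2 (build_corr_table sample_2D borders_1 borders_2)

-- ===== LEMMAS AND PROOFS =====

-- the common specification: one count per (interval,interval) cell
def pvCnt (s : List (Int × Int)) (p q : Int × Int) : Int :=
  (s.countP (fun x => pvCheck x.1 x.2 p q) : Int)

def pvMid (s : List (Int × Int)) (b1s b2s : List (Int × Int)) : List (List Int) :=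
  b1s.map (fun p => b2s.map (fun q => pvCnt s p q))

-- sum of mapped 0/1 indicators is countP
theorem pvSumA (s : List (Int × Int)) (f : Int × Int → Bool) :
    (s.map f).foldl (fun acc b => acc + (if b then (1:Int) else 0)) 0 = (s.countP f : Int) := by
  rw [List.foldl_map]
  have hfun : (fun (acc : Int) x => acc + if f x then (1:Int) else 0)
      = fun acc x => if f x then acc + 1 else acc := by
    funext acc x; by_cases h : f x <;> simp [h]
  rw [hfun]
  simpa using PySem.List.foldl_if_add_one (l := s) (p := f) (a := 0)

theorem pvSetLast {α : Type} (P : List α) (r v : α) :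
    (P ++ [r]).set P.length v = P ++ [v] := by
  induction P with
  | nil => rfl
  | cons a P ih => simpa using ih

theorem pvGetLast {α : Type} (P : List α) (r : α) (d : α) :
    (P ++ [r]).getD P.length d = r := by
  induction P with
  | nil => rfl
  | cons a P ih => simpa using ih

-- inner loop of A: repeatedly appending to the last row
theorem pvInnerA (c : Int → Int) (J : List Int) :
    ∀ (P : List (List Int)) (r : List Int),
    J.foldl (fun t j => PySem.List.pySetD t (P.length : Int)
        ((PySem.List.pyGetD t (P.length : Int) []) ++ [c j])) (P ++ [r])
      = P ++ [r ++ J.map c] := by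
  induction J with
  | nil => intro P r; simp
  | cons j J ih =>
    intro P r
    rw [List.foldl_cons,
      show PySem.List.pySetD (P ++ [r]) (P.length : Int)
          ((PySem.List.pyGetD (P ++ [r]) (P.length : Int) []) ++ [c j]) = P ++ [r ++ [c j]] from by
        simp [pvGetLast, pvSetLast],
      ih P (r ++ [c j])]
    simp

-- a fold that conditionally sets each index at most once, in increasing order
theorem pvSetFoldAux {α : Type} (d : α) (c : Nat → Bool) (u : Nat → α → α) :
    ∀ (n : Nat) (G : List α), n ≤ G.length →
    (List.range n).foldl (fun g k => if c k then g.set k (u k (g.getD k d)) else g) G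
      = G.mapIdx (fun k r => if k < n ∧ c k = true then u k r else r) := by
  intro n
  induction n with
  | zero => intro G _; apply List.ext_getElem <;> simp
  | succ n ih =>
    intro G hn
    rw [List.range_succ, List.foldl_append, ih G (by omega)]
    simp only [List.foldl_cons, List.foldl_nil]
    have hn' : n < G.length := by omega
    by_cases h : c n
    · rw [if_pos h]
      apply List.ext_getElem
      · simp
      · intro k hk1 hk2
        have hGlen : k < G.length := by simpa using hk2
        rw [List.getElem_set]
        by_cases hkn : k = n
        · subst hkn
          rw [if_pos rfl, List.getElem_mapIdx, if_pos ⟨by omega, h⟩,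
            List.getD_eq_getElem _ _ (by simpa using hn'), List.getElem_mapIdx, if_neg (by simp)]
        · rw [if_neg (Ne.symm hkn), List.getElem_mapIdx, List.getElem_mapIdx]
          by_cases hc : k < n ∧ c k = true
          · rw [if_pos hc, if_pos ⟨by omega, hc.2⟩]
          · rw [if_neg hc, if_neg (by rintro ⟨h1, h2⟩; exact hc ⟨by omega, h2⟩)]
    · rw [if_neg h]
      apply List.ext_getElem
      · simp
      · intro k hk1 hk2
        rw [List.getElem_mapIdx, List.getElem_mapIdx]
        by_cases hc : k < n ∧ c k = true
        · rw [if_pos hc, if_pos ⟨by omega, hc.2⟩]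
        · rw [if_neg hc, if_neg]
          rintro ⟨h1, h2⟩
          rcases Nat.lt_succ_iff_lt_or_eq.mp h1 with h' | h'
          · exact hc ⟨h', h2⟩
          · subst h'; exact absurd h2 (by simpa using h)

-- zip a mapped copy of a list with the list itself
theorem pvZipMapSelf {α β γ : Type} (f : α → β) (h : β → α → γ) (l : List α) :
    ((l.map f).zip l).map (fun z => h z.1 z.2) = l.map (fun a => h (f a) a) := by
  induction l with
  | nil => rfl
  | cons a l ih => simpa using ih

-- conditional once-per-index set-fold over a python range, closed form
theorem pvCondSetFold {α : Type} (d0 : Int × Int) (d : α)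
    (bs : List (Int × Int)) (G : List α) (hG : G.length = bs.length)
    (cb : (Int × Int) → Bool) (u : α → α) :
    (PySem.List.pyRange 0 (bs.length : Int) 1).foldl
      (fun g j => if cb (PySem.List.pyGetD bs j d0) then
          PySem.List.pySetD g j (u (PySem.List.pyGetD g j d)) else g) G
      = (G.zip bs).map (fun z => if cb z.2 then u z.1 else z.1) := by
  rw [PySem.List.pyRange_one, List.foldl_map]
  simp only [Int.sub_zero, Int.toNat_natCast, Int.zero_add, PySem.List.pySetD_natCast,
    PySem.List.pyGetD_natCast]
  rw [pvSetFoldAux d (fun k => cb (bs.getD k d0)) (fun _ v => u v) bs.length G (by omega)]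
  apply List.ext_getElem
  · simp [hG]
  · intro k hk1 hk2
    have hkb : k < bs.length := by
      have := hk2; simp at this; omega
    have hkG : k < G.length := by omega
    simp only [List.getElem_mapIdx, List.getElem_map, List.getElem_zip]
    rw [List.getD_eq_getElem bs d0 hkb]
    simp [hkb]

-- one sample's update on a grid in map form
theorem pvStepB (b1s b2s : List (Int × Int)) (xy : Int × Int)
    (f : (Int × Int) → (Int × Int) → Int) :
    ((PySem.List.enumerate b1s).foldl (fun g p =>
      if pvIn p.2 xy.1 then
        PySem.List.pySetD g p.1
          ((((PySem.List.enumerate b2s).filter (fun p => pvIn p.2 xy.2)).map (·.1)).foldl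
             (fun row j => PySem.List.pySetD row j (PySem.List.pyGetD row j 0 + 1))
             (PySem.List.pyGetD g p.1 []))
      else g) (b1s.map (fun p => b2s.map (fun q => f p q))))
    = b1s.map (fun p => b2s.map (fun q => f p q + (if pvCheck xy.1 xy.2 p q then 1 else 0))) := by
  have hrow : ∀ g0 : (Int × Int) → Int,
      ((((PySem.List.enumerate b2s).filter (fun p => pvIn p.2 xy.2)).map (·.1)).foldl
        (fun row j => PySem.List.pySetD row j (PySem.List.pyGetD row j 0 + 1))
        (b2s.map g0))
      = b2s.map (fun q => if pvIn q xy.2 then g0 q + 1 else g0 q) := by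
    intro g0
    rw [List.foldl_map, ← PySem.List.foldl_if_eq_foldl_filter,
      PySem.List.enumerate_eq_map_pyRange b2s ((0:Int),(0:Int)), List.foldl_map]
    simp only [PySem.List.len_eq]
    rw [pvCondSetFold ((0:Int),(0:Int)) (0:Int) b2s (b2s.map g0) (by simp)
      (fun q => pvIn q xy.2) (fun v => v + 1)]
    rw [pvZipMapSelf g0 (fun v q => if pvIn q xy.2 then v + 1 else v) b2s]
  rw [PySem.List.enumerate_eq_map_pyRange b1s ((0:Int),(0:Int)), List.foldl_map]
  simp only [PySem.List.len_eq]
  rw [pvCondSetFold ((0:Int),(0:Int)) ([] : List Int) b1s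
    (b1s.map (fun p => b2s.map (fun q => f p q))) (by simp)
    (fun p => pvIn p xy.1)
    (fun row => (((PySem.List.enumerate b2s).filter (fun p => pvIn p.2 xy.2)).map (·.1)).foldl
       (fun row j => PySem.List.pySetD row j (PySem.List.pyGetD row j 0 + 1)) row)]
  rw [pvZipMapSelf (fun p => b2s.map (fun q => f p q))
    (fun row p => if pvIn p xy.1 then
        (((PySem.List.enumerate b2s).filter (fun p => pvIn p.2 xy.2)).map (·.1)).foldl
          (fun row j => PySem.List.pySetD row j (PySem.List.pyGetD row j 0 + 1)) row
      else row) b1s]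
  apply List.map_congr_left
  intro p _
  by_cases hp : pvIn p xy.1
  · rw [if_pos hp, hrow (fun q => f p q)]
    apply List.map_congr_left
    intro q _
    by_cases hq : pvIn q xy.2
    · rw [if_pos hq, if_pos (by simp [pvCheck, pvIn, ge_iff_le] at hp hq ⊢; omega)]
    · rw [if_neg hq, if_neg (by simp [pvCheck, pvIn, ge_iff_le] at hq ⊢; omega), add_zero]
  · rw [if_neg hp]
    apply List.map_congr_left
    intro q _
    rw [if_neg (by simp [pvCheck, pvIn, ge_iff_le] at hp ⊢; omega), add_zero]

-- folding all samples
theorem pvFoldSamples (b1s b2s : List (Int × Int)) :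
    ∀ (s : List (Int × Int)) (f : (Int × Int) → (Int × Int) → Int),
    s.foldl (fun grid xy =>
      (PySem.List.enumerate b1s).foldl (fun g p =>
        if pvIn p.2 xy.1 then
          PySem.List.pySetD g p.1
            ((((PySem.List.enumerate b2s).filter (fun p => pvIn p.2 xy.2)).map (·.1)).foldl
               (fun row j => PySem.List.pySetD row j (PySem.List.pyGetD row j 0 + 1))
               (PySem.List.pyGetD g p.1 []))
        else g) grid) (b1s.map (fun p => b2s.map (fun q => f p q)))
    = b1s.map (fun p => b2s.map (fun q => f p q + (s.countP (fun x => pvCheck x.1 x.2 p q) : Int))) := by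
  intro s
  induction s with
  | nil => intro f; simp
  | cons x s ih =>
    intro f
    rw [List.foldl_cons, pvStepB b1s b2s x f, ih]
    apply List.map_congr_left
    intro p _
    apply List.map_congr_left
    intro q _
    rw [List.countP_cons]
    by_cases h : pvCheck x.1 x.2 p q <;> simp [h] <;> push_cast <;> ring

theorem pvB_eq_mid (s b1s b2s : List (Int × Int)) :
    build_corr_table_alt s b1s b2s = pvMid s b1s b2s := by
  show (s.foldl _ (b1s.map (fun _ => b2s.map (fun _ => (0:Int))))) = _
  have h0 : (b1s.map (fun _ => b2s.map (fun _ => (0:Int))))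
      = b1s.map (fun p => b2s.map (fun q => (fun _ _ => (0:Int)) p q)) := rfl
  rw [h0, pvFoldSamples b1s b2s s (fun _ _ => 0)]
  simp [pvMid, pvCnt]

theorem pvOuterA (s b1s b2s : List (Int × Int)) :
    ∀ (n : Nat), n ≤ b1s.length →
    (PySem.List.pyRange 0 (n : Int) 1).foldl (fun (table : List (List Int)) (i : Int) =>
      (PySem.List.pyRange 0 (b2s.length : Int) 1).foldl (fun t j =>
        PySem.List.pySetD t i ((PySem.List.pyGetD t i []) ++
          [(s.map (fun x => pvCheck x.1 x.2 (PySem.List.pyGetD b1s i ((0:Int),(0:Int)))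
              (PySem.List.pyGetD b2s j ((0:Int),(0:Int))))).foldl
            (fun acc b => acc + (if b then (1:Int) else 0)) 0]))
        (table ++ [[]])) []
    = (b1s.take n).map (fun p => b2s.map (fun q => pvCnt s p q)) := by
  intro n
  induction n with
  | zero => simp [PySem.List.pyRange_one]
  | succ n ih =>
    intro hn
    have hcast : (((n + 1 : Nat)) : Int) = (n : Int) + 1 := by push_cast; ring
    rw [hcast, PySem.List.pyRange_one_succ_right (by positivity), List.foldl_append,
      ih (by omega), List.foldl_cons, List.foldl_nil]
    have hn' : n < b1s.length := by omega
    have hT : ((b1s.take n).map (fun p => b2s.map (fun q => pvCnt s p q))).length = n := by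
      simp; omega
    set T := (b1s.take n).map (fun p => b2s.map (fun q => pvCnt s p q)) with hTdef
    have hb1 : PySem.List.pyGetD b1s ((n : Nat) : Int) ((0:Int),(0:Int)) = b1s[n] := by
      rw [PySem.List.pyGetD_natCast, List.getD_eq_getElem _ _ hn']
    have hbody : (fun (t : List (List Int)) (j : Int) =>
        PySem.List.pySetD t ((n : Nat) : Int) ((PySem.List.pyGetD t ((n : Nat) : Int) []) ++
          [(s.map (fun x => pvCheck x.1 x.2 (PySem.List.pyGetD b1s ((n : Nat) : Int) ((0:Int),(0:Int)))
              (PySem.List.pyGetD b2s j ((0:Int),(0:Int))))).foldl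
            (fun acc b => acc + (if b then (1:Int) else 0)) 0]))
      = fun (t : List (List Int)) (j : Int) =>
        PySem.List.pySetD t (T.length : Int) ((PySem.List.pyGetD t (T.length : Int) []) ++
          [pvCnt s b1s[n] (PySem.List.pyGetD b2s j ((0:Int),(0:Int)))]) := by
      funext t j
      rw [pvSumA, hT, hb1]
      rfl
    rw [hbody, pvInnerA (fun j => pvCnt s b1s[n] (PySem.List.pyGetD b2s j ((0:Int),(0:Int)))) _ T []]
    have hmapc : (PySem.List.pyRange 0 (b2s.length : Int) 1).map
          (fun j => pvCnt s b1s[n] (PySem.List.pyGetD b2s j ((0:Int),(0:Int))))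
        = b2s.map (fun q => pvCnt s b1s[n] q) := by
      rw [show (fun (j : Int) => pvCnt s b1s[n] (PySem.List.pyGetD b2s j ((0:Int),(0:Int))))
          = (fun q => pvCnt s b1s[n] q) ∘ (fun j => PySem.List.pyGetD b2s j ((0:Int),(0:Int)))
          from rfl,
        ← List.map_map, PySem.List.map_pyGetD_pyRange_zero']
    rw [hmapc, hTdef, List.take_add_one, List.getElem?_eq_getElem hn']
    simp
    have hcat := List.take_concat_get (l := List.map (fun p => List.map (fun q => pvCnt s p q) b2s) b1s)
      (i := n) (h := by simpa using hn')
    simpa using hcat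

theorem pvA_eq_mid (s b1s b2s : List (Int × Int)) :
    build_corr_table s b1s b2s = pvMid s b1s b2s := by
  have h := pvOuterA s b1s b2s b1s.length le_rfl
  rw [List.take_length] at h
  exact h

-- ===== VERDICT (by name: the statement is the Claim_ definition above) =====
theorem build_corr_table_spec : Claim_equal_build_corr_table := by
  intro s b1s b2s _
  show build_corr_table s b1s b2s = build_corr_table_alt s b1s b2s
  rw [pvA_eq_mid, pvB_eq_mid]
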